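-- pv_equiv track=rewrite | github.com/AndreiPiterbarg/compact_sidon | tests/compute_exact_alpha.py | precompute_window_pairs
-- ===== SOURCE A (Python) =====
-- def precompute_window_pairs(d):
--     """Precompute (i, j) pairs for each window (ell, s0)."""
--     conv_len = 2 * d - 1
--     max_ell = 2 * d
--     windows = []
--     for ell in range(2, max_ell + 1):
--         for s0 in range(conv_len - ell + 2):
--             pairs = []
--             for s in range(s0, s0 + ell - 1):
--                 for i in range(max(0, s - d + 1), min(d, s + 1)):
--                     pairs.append((i, s - i))
--             windows.append((ell, s0, pairs))
--     return windows
-- ===== SOURCE B (Python) =====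
-- def precompute_window_pairs(d):
--     """Precompute (i, j) pairs for each window (ell, s0)."""
--     conv_len = 2 * d - 1
--     # one table of per-diagonal pair lists, built once
--     pairs_for_s = [[(i, s - i) for i in range(max(0, s - d + 1), min(d, s + 1))]
--                    for s in range(conv_len)]
--     windows = []
--     for ell in range(2, 2 * d + 1):
--         for s0 in range(conv_len - ell + 2):
--             pairs = [p for s in range(s0, s0 + ell - 1) for p in pairs_for_s[s]]
--             windows.append((ell, s0, pairs))
--     return windows
-- ===== Notes on version B (the rewrite author's own statement) =====
-- stated objective: faster
-- what changed: B precomputes one table pairs_for_s of the (i, s-i) pair list for every diagonal s and builds each window's list by flat concatenation of table entries, instead of re-running the nested i-loop inside every window.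
import Mathlib
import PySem

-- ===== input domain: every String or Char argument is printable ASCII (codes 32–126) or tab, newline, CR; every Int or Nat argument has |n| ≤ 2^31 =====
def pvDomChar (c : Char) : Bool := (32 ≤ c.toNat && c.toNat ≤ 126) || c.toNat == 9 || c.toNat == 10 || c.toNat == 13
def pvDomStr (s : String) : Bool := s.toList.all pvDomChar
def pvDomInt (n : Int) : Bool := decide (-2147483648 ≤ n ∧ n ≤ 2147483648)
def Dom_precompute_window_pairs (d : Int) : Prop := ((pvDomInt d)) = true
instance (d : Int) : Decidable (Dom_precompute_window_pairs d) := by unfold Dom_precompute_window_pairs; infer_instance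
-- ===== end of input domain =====

-- B precomputes the per-diagonal pair lists once and builds each window by concatenating
-- cached table entries instead of re-running the nested i-loop (objective: faster, constant-factor).


-- ===== PORT A =====
-- Python lists are growable arrays; '.append' is ported as Array.push (O(1), like CPython's append).
def precompute_window_pairs (d : Int) : List (Int × Int × (List (Int × Int))) :=
  let conv_len := 2 * d - 1
  let max_ell := 2 * d
  ((PySem.List.pyRange 2 (max_ell + 1) 1).foldl (fun (windows : Array (Int × Int × (List (Int × Int)))) ell =>
    (PySem.List.pyRange 0 (conv_len - ell + 2) 1).foldl (fun windows s0 =>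
      let pairs :=
        ((PySem.List.pyRange s0 (s0 + ell - 1) 1).foldl (fun (pairs : Array (Int × Int)) s =>
          (PySem.List.pyRange (max 0 (s - d + 1)) (min d (s + 1)) 1).foldl (fun pairs i =>
            pairs.push (i, s - i)) pairs) #[]).toList
      windows.push (ell, s0, pairs)) windows) #[]).toList

-- ===== PORT B =====
-- pairs_for_s[s] is indexed with 0 ≤ s < conv_len in Source B, so pyGetD's default is never reached.
def precompute_window_pairs_alt (d : Int) : List (Int × Int × (List (Int × Int))) :=
  let conv_len := 2 * d - 1
  let pairs_for_s := (PySem.List.pyRange 0 conv_len 1).map (fun s =>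
    (PySem.List.pyRange (max 0 (s - d + 1)) (min d (s + 1)) 1).map (fun i => (i, s - i)))
  ((PySem.List.pyRange 2 (2 * d + 1) 1).foldl (fun (windows : Array (Int × Int × (List (Int × Int)))) ell =>
    (PySem.List.pyRange 0 (conv_len - ell + 2) 1).foldl (fun windows s0 =>
      let pairs := (PySem.List.pyRange s0 (s0 + ell - 1) 1).flatMap (fun s =>
        PySem.List.pyGetD pairs_for_s s [])
      windows.push (ell, s0, pairs)) windows) #[]).toList

-- ===== PRECONDITION & SPEC =====
def Spec_precompute_window_pairs (d : Int) (out : List (Int × Int × (List (Int × Int)))) : Prop := out = precompute_window_pairs_alt d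
instance (d : Int) (out : List (Int × Int × (List (Int × Int)))) : Decidable (Spec_precompute_window_pairs d out) := by unfold Spec_precompute_window_pairs; infer_instance

-- ===== CLAIM (what is proved, stated in full; the proofs are below) =====
def Claim_equal_precompute_window_pairs : Prop := ∀ (d : Int), Dom_precompute_window_pairs d → Spec_precompute_window_pairs d (precompute_window_pairs d)

-- ===== LEMMAS AND PROOFS =====

-- the per-diagonal pair list both programs produce for diagonal s
def pvDiag (d s : Int) : List (Int × Int) :=
  (PySem.List.pyRange (max 0 (s - d + 1)) (min d (s + 1)) 1).map (fun i => (i, s - i))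

-- a fold whose step appends (as a list) h x to the array appends l.flatMap h
theorem pvFoldPush {α β : Type} (l : List α) (g : Array β → α → Array β) (h : α → List β)
    (hg : ∀ (a : Array β) (x : α), x ∈ l → (g a x).toList = a.toList ++ h x) :
    ∀ (a : Array β), (l.foldl g a).toList = a.toList ++ l.flatMap h := by
  induction l with
  | nil => intro a; simp
  | cons x xs ih =>
    intro a
    have hx := hg a x (by simp)
    simp only [List.foldl_cons, List.flatMap_cons]
    rw [ih (fun a y hy => hg a y (by simp [hy])) (g a x), hx, List.append_assoc]

-- A's innermost i-loop pushes exactly the diagonal's pairs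
theorem pvA_inner (d s : Int) (a : Array (Int × Int)) :
    ((PySem.List.pyRange (max 0 (s - d + 1)) (min d (s + 1)) 1).foldl (fun pairs i =>
      pairs.push (i, s - i)) a).toList = a.toList ++ pvDiag d s := by
  rw [pvFoldPush _ _ (fun i => [(i, s - i)]) (fun a i _ => by simp)]
  simp [pvDiag, List.map_eq_flatMap]

-- A's per-window nested loop produces the flat concatenation of the diagonal lists
theorem pvA_window (d s0 e : Int) :
    (((PySem.List.pyRange s0 (s0 + e - 1) 1).foldl (fun (pairs : Array (Int × Int)) s =>
      (PySem.List.pyRange (max 0 (s - d + 1)) (min d (s + 1)) 1).foldl (fun pairs i =>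
        pairs.push (i, s - i)) pairs) #[]).toList) =
    (PySem.List.pyRange s0 (s0 + e - 1) 1).flatMap (fun s => pvDiag d s) := by
  rw [pvFoldPush _ _ (fun s => pvDiag d s) (fun a s _ => pvA_inner d s a)]
  simp

-- indexing B's cached table at an in-range diagonal yields that diagonal's list
theorem pvB_lookup (d s : Int) (h0 : 0 ≤ s) (h1 : s < 2 * d - 1) :
    PySem.List.pyGetD ((PySem.List.pyRange 0 (2 * d - 1) 1).map (fun s => pvDiag d s)) s [] =
    pvDiag d s :=
  PySem.List.pyGetD_map_pyRange_of_nonneg _ _ _ _ h0 h1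

-- ===== VERDICT (by name: the statement is the Claim_ definition above) =====
theorem precompute_window_pairs_spec : Claim_equal_precompute_window_pairs := by
  intro d _
  unfold Spec_precompute_window_pairs precompute_window_pairs precompute_window_pairs_alt
  simp only
  rw [pvFoldPush (PySem.List.pyRange 2 (2 * d + 1) 1) _
      (fun ell => (PySem.List.pyRange 0 (2 * d - 1 - ell + 2) 1).flatMap
        (fun s0 => [(ell, s0, (PySem.List.pyRange s0 (s0 + ell - 1) 1).flatMap (fun s => pvDiag d s))]))
      (fun w ell _ => by
        exact pvFoldPush _ _ _ (fun w' s0 hs0 => by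
          simp only [Array.toList_push]
          rw [pvA_window d s0 ell]) w),
    pvFoldPush (PySem.List.pyRange 2 (2 * d + 1) 1) _
      (fun ell => (PySem.List.pyRange 0 (2 * d - 1 - ell + 2) 1).flatMap
        (fun s0 => [(ell, s0, (PySem.List.pyRange s0 (s0 + ell - 1) 1).flatMap (fun s => pvDiag d s))]))
      (fun w ell hell => by
        refine pvFoldPush _ _ _ (fun w' s0 hs0 => ?_) w
        simp only [Array.toList_push]
        rw [PySem.List.mem_pyRange_one] at hell hs0
        congr 2
        simp only [Prod.mk.injEq, true_and]
        refine List.flatMap_congr (fun s hs => ?_)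
        rw [PySem.List.mem_pyRange_one] at hs
        exact pvB_lookup d s (by omega) (by omega))]
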